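-- pv_equiv track=rewrite | github.com/WojciechMula/toys | suggestions/test.py | make_bit_hist
-- ===== SOURCE A (Python) =====
-- def make_bit_hist(s):
--     h = [0] * 4
--     for i in range(len(s)):
--         b = ord(s[i])
--
--         word_idx = b >> 6
--         bit_pos  = b & 0x3f
--         bit      = 1 << bit_pos
--
--         h[word_idx] |= bit
--
--     return h
-- ===== SOURCE B (Python) =====
-- def make_bit_hist(s):
--     def word(w):
--         m = 0
--         for c in s:
--             b = ord(c)
--             if b >> 6 == w:
--                 m |= 1 << (b & 0x3f)
--         return m
--     return [word(w) for w in range(4)]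
-- ===== Notes on version B (the rewrite author's own statement) =====
-- stated objective: alternative
-- what changed: B builds each of the four 64-bit words independently as a pure fold over the string (a per-word comprehension), instead of A's single pass mutating a 4-element list via computed indices.
import Mathlib
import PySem

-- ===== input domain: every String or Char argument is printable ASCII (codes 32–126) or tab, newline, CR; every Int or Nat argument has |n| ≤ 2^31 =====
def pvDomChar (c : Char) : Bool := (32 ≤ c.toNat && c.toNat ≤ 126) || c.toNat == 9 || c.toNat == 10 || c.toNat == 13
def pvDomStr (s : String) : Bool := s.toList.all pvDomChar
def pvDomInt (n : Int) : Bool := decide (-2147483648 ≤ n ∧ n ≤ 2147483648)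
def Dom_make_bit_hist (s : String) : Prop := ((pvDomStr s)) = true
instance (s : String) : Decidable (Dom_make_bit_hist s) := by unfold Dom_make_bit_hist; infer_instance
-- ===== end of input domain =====

-- B replaces A's single pass that mutates a 4-word list through computed indices by four
-- independent pure folds, one per output word (objective: alternative decomposition, same O(n)).

-- ===== PORT A =====
-- one loop step of A: b = ord(s[i]); h[b>>6] |= 1 << (b & 0x3f)
def pvStepA (h : List Int) (c : Char) : List Int :=
  let b : Int := (c.toNat : Int)
  let wordIdx : Int := b >>> (6 : Nat)
  let bit : Int := (1 : Int) <<< (PySem.Int.band b 63).toNat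
  PySem.List.pySetD h wordIdx (PySem.Int.bor (PySem.List.pyGetD h wordIdx 0) bit)

def make_bit_hist (s : String) : List Int :=
  (PySem.List.pyRange 0 (s.toList.length : Int) 1).foldl
    (fun h i => pvStepA h (PySem.List.pyGetD s.toList i ' '))
    [0, 0, 0, 0]

-- ===== PORT B =====
-- word(w): fold over the characters, OR-ing in the bit when b >> 6 == w
def pvWord (s : String) (w : Int) : Int :=
  s.toList.foldl
    (fun m c =>
      let b : Int := (c.toNat : Int)
      if b >>> (6 : Nat) = w then PySem.Int.bor m ((1 : Int) <<< (PySem.Int.band b 63).toNat)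
      else m)
    0

def make_bit_hist_alt (s : String) : List Int :=
  (PySem.List.pyRange 0 4 1).map (pvWord s)

-- ===== PRECONDITION & SPEC =====
def Spec_make_bit_hist (s : String) (out : List Int) : Prop := out = make_bit_hist_alt s
instance (s : String) (out : List Int) : Decidable (Spec_make_bit_hist s out) := by unfold Spec_make_bit_hist; infer_instance

-- ===== CLAIM (what is proved, stated in full; the proofs are below) =====
def Claim_equal_make_bit_hist : Prop := ∀ (s : String), Dom_make_bit_hist s → Spec_make_bit_hist s (make_bit_hist s)

-- ===== LEMMAS AND PROOFS =====

-- B's fold step, as a named function for the invariant lemma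
def pvStepB (w : Int) (m : Int) (c : Char) : Int :=
  let b : Int := (c.toNat : Int)
  if b >>> (6 : Nat) = w then PySem.Int.bor m ((1 : Int) <<< (PySem.Int.band b 63).toNat)
  else m

theorem pvShift_cast (c : Char) : ((c.toNat : Int) >>> (6 : Nat)) = ((c.toNat >>> 6 : Nat) : Int) := by
  simp [Int.shiftRight_eq]

-- the main invariant: A's fold over a 4-word state is the tuple of B's per-word folds
theorem pv_main (cs : List Char) (hdom : ∀ c ∈ cs, pvDomChar c = true) :
    ∀ h0 h1 h2 h3 : Int,
      cs.foldl pvStepA [h0, h1, h2, h3] =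
        [cs.foldl (pvStepB 0) h0, cs.foldl (pvStepB 1) h1,
         cs.foldl (pvStepB 2) h2, cs.foldl (pvStepB 3) h3] := by
  induction cs with
  | nil => intro h0 h1 h2 h3; rfl
  | cons c cs ih =>
    intro h0 h1 h2 h3
    have hc : pvDomChar c = true := hdom c (List.mem_cons_self ..)
    have hle : c.toNat ≤ 126 := by
      simp [pvDomChar] at hc; omega
    have hsh : c.toNat >>> 6 = c.toNat / 64 := Nat.shiftRight_eq_div_pow c.toNat 6
    have hdom' : ∀ x ∈ cs, pvDomChar x = true := fun x hx => hdom x (List.mem_cons_of_mem _ hx)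
    by_cases h64 : c.toNat < 64
    · have hw : ((c.toNat : Int) >>> (6 : Nat)) = 0 := by
        rw [pvShift_cast, hsh]; norm_cast; omega
      have hA : pvStepA [h0, h1, h2, h3] c =
          [PySem.Int.bor h0 ((1 : Int) <<< (PySem.Int.band (c.toNat : Int) 63).toNat), h1, h2, h3] := by
        simp [pvStepA, hw, PySem.List.pySetD_of_nonneg, PySem.List.pyGetD]
      rw [List.foldl_cons, hA, ih hdom']
      simp [List.foldl_cons, pvStepB, hw]
    · have hw : ((c.toNat : Int) >>> (6 : Nat)) = 1 := by
        rw [pvShift_cast, hsh]; norm_cast; omega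
      have hA : pvStepA [h0, h1, h2, h3] c =
          [h0, PySem.Int.bor h1 ((1 : Int) <<< (PySem.Int.band (c.toNat : Int) 63).toNat), h2, h3] := by
        simp [pvStepA, hw, PySem.List.pySetD_of_nonneg, PySem.List.pyGetD]
      rw [List.foldl_cons, hA, ih hdom']
      simp [List.foldl_cons, pvStepB, hw]

-- ===== VERDICT (by name: the statement is the Claim_ definition above) =====
theorem make_bit_hist_spec : Claim_equal_make_bit_hist := by
  intro s hdom
  unfold Spec_make_bit_hist make_bit_hist make_bit_hist_alt
  rw [PySem.List.foldl_pyRange_zero_pyGetD' s.toList ' ' pvStepA [0,0,0,0]]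
  have hall : ∀ c ∈ s.toList, pvDomChar c = true := by
    simpa [Dom_make_bit_hist, pvDomStr, List.all_eq_true] using hdom
  rw [pv_main s.toList hall 0 0 0 0]
  rfl
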